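-- pv_equiv track=rewrite | github.com/arnavbhola123/MORT | src/indexer/call_graph.py | _build_name_index
-- ===== SOURCE A (Python) =====
-- from typing import Dict, List, Optional, Tuple
--
-- def _build_name_index(functions: List[Dict]) -> Dict[str, List[Dict]]:
--     """
--     Build a lookup from simple function name -> list of function dicts.
--     Used for cross-file resolution by name.
--     """
--     index = {}
--     for func in functions:
--         name = func["name"]
--         if name not in index:
--             index[name] = []
--         index[name].append(func)
--     return index
-- ===== SOURCE B (Python) =====
-- from typing import Dict, List, Optional, Tuple
--
-- def _build_name_index(functions: List[Dict]) -> Dict[str, List[Dict]]: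
--     """Group function dicts by name: distinct names in first-occurrence order,
--     then one filtering pass per name."""
--     names = dict.fromkeys(f["name"] for f in functions)
--     return {n: [f for f in functions if f["name"] == n] for n in names}
-- ===== Notes on version B (the rewrite author's own statement) =====
-- stated objective: simpler
-- what changed: A builds the index in one pass mutating a dict (insert-empty-then-append per element); B first dedups the names in first-occurrence order via dict.fromkeys and then builds each group with a comprehension filtering the whole list per name.
import Mathlib
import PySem

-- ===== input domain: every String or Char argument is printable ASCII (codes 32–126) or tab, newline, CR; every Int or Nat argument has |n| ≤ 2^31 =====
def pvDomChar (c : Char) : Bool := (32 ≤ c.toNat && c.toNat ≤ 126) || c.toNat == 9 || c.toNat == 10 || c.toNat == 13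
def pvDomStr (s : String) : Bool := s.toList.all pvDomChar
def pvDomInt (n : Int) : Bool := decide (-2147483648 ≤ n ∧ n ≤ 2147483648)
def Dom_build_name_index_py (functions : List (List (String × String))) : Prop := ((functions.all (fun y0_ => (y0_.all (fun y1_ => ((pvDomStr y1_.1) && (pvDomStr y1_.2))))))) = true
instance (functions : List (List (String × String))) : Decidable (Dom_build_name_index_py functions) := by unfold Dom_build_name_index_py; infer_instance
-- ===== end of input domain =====

-- B replaces A's single mutating-dict pass by: dedup the names (first-occurrence order), then one filter pass per name; same result, no speed claim.

-- ===== PORT A =====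
-- func["name"] (total under Pre_, which guarantees the key is present)
def pvName (func : List (String × String)) : String :=
  (PySem.Dict.mk func).getD "name" ""

def build_name_index_py (functions : List (List (String × String))) : List (String × List (List (String × String))) :=
  (functions.foldl
    (fun index func =>
      let name := pvName func
      let index' := if index.contains name then index else index.insert name []
      index'.modify name [] (fun l => l ++ [func]))
    PySem.Dict.empty).items

-- ===== PORT B =====
def build_name_index_py_alt (functions : List (List (String × String))) : List (String × List (List (String × String))) :=
  (PySem.List.dedup (functions.map pvName)).map
    (fun n => (n, functions.filter (fun f => pvName f == n)))

-- ===== PRECONDITION & SPEC =====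
-- Pre_ excludes exactly the inputs where some dict lacks the "name" key: Python A (and B) raise KeyError there.
def Pre_build_name_index_py (functions : List (List (String × String))) : Prop :=
  ∀ func ∈ functions, "name" ∈ func.map Prod.fst
instance (functions : List (List (String × String))) : Decidable (Pre_build_name_index_py functions) := by unfold Pre_build_name_index_py; infer_instance
def pvWitness_build_name_index_py : (List (List (String × String))) :=
  [[("name", "f"), ("arg", "x")], [("name", "g")], [("name", "f")]]

def Spec_build_name_index_py (functions : List (List (String × String))) (out : List (String × List (List (String × String)))) : Prop := out = build_name_index_py_alt functions
instance (functions : List (List (String × String))) (out : List (String × List (List (String × String)))) : Decidable (Spec_build_name_index_py functions out) := by unfold Spec_build_name_index_py; infer_instance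

-- ===== CLAIM (what is proved, stated in full; the proofs are below) =====
def Claim_equal_build_name_index_py : Prop := ∀ (functions : List (List (String × String))), Dom_build_name_index_py functions → Pre_build_name_index_py functions → Spec_build_name_index_py functions (build_name_index_py functions)

-- ===== LEMMAS AND PROOFS =====

-- first-match lookup in an appended pair: helper for the step lemma below
theorem pv_get?_mk_append_self {ν : Type} (l : List (String × ν)) (n : String) (v : ν)
    (h : ∀ p ∈ l, p.1 ≠ n) : (PySem.Dict.mk (l ++ [(n, v)])).get? n = some v := by
  induction l with
  | nil => simp [PySem.Dict.get?_mk_cons]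
  | cons p t ih =>
    rw [List.cons_append, PySem.Dict.get?_mk_cons]
    have := h p (by simp)
    simp only [beq_iff_eq, if_neg this]
    exact ih (fun q hq => h q (by simp [hq]))

-- A's body "if name not in index: index[name] = []; index[name].append(func)" is d.modify name [] (· ++ [func])
theorem pv_stepA_eq_modify {ν : Type} (d : PySem.Dict String (List ν)) (n : String) (g : List ν → List ν) :
    (if d.contains n then d else d.insert n []).modify n [] g = d.modify n [] g := by
  by_cases h : d.contains n = true
  · rw [if_pos h]
  · rw [Bool.not_eq_true] at h
    rw [if_neg (by simp [h])]
    have hmem : ∀ p ∈ d.items, p.1 ≠ n := by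
      intro p hp hpn
      have : n ∈ d.keys := by
        have := PySem.Dict.mem_keys_of_mem_items (d := d) (p := p) hp
        rwa [hpn] at this
      rw [← PySem.Dict.contains_iff_mem_keys] at this
      simp [h] at this
    simp only [PySem.Dict.modify, PySem.Dict.insert, h]
    simp only [Bool.false_eq_true, if_false]
    have hg : ({ items := d.items ++ [(n, ([] : List ν))] } : PySem.Dict String (List ν)).getD n [] = [] := by
      rw [PySem.Dict.getD_eq_get?_getD, pv_get?_mk_append_self d.items n [] hmem]; rfl
    have hd : d.getD n [] = [] := PySem.Dict.getD_of_not_contains d [] h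
    rw [hg, hd]
    have hc : ({ items := d.items ++ [(n, ([] : List ν))] } : PySem.Dict String (List ν)).contains n = true := by
      rw [PySem.Dict.contains_eq_isSome_get?, pv_get?_mk_append_self d.items n [] hmem]; rfl
    rw [if_pos hc]
    apply PySem.Dict.ext
    simp only [List.map_append, List.map_cons, List.map_nil, beq_self_eq_true, if_true]
    rw [List.map_congr_left (fun p hp => if_neg (by simp [hmem p hp]))]
    simp

-- ===== VERDICT (by name: the statement is the Claim_ definition above) =====
theorem build_name_index_py_spec : Claim_equal_build_name_index_py := by
  intro functions _ _
  show build_name_index_py functions = build_name_index_py_alt functions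
  unfold build_name_index_py build_name_index_py_alt
  -- collapse A's two-step body into a single modify
  have hfun : (fun (index : PySem.Dict String (List (List (String × String)))) func =>
      let name := pvName func
      let index' := if index.contains name then index else index.insert name []
      index'.modify name [] (fun l => l ++ [func]))
      = (fun d func => d.modify (pvName func) [] (fun l => l ++ [func])) := by
    funext d f
    exact pv_stepA_eq_modify d (pvName f) _
  rw [hfun]
  have hnd : ((functions.foldl (fun d func => d.modify (pvName func) [] (fun l => l ++ [func])) PySem.Dict.empty).keys).Nodup :=
    PySem.Dict.nodup_keys_foldl_modify_key functions pvName [] _ PySem.Dict.empty PySem.Dict.nodup_keys_empty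
  rw [PySem.Dict.items_eq_map_keys _ hnd []]
  have hkeys : (functions.foldl (fun d func => d.modify (pvName func) [] (fun l => l ++ [func])) PySem.Dict.empty).keys
      = PySem.List.dedup (functions.map pvName) := by
    rw [PySem.Dict.keys_foldl_modify_key]
    simp [PySem.Dict.keys_empty, PySem.Set.update, PySem.List.dedup_eq_ofList, PySem.Set.ofList_eq_foldl]
  rw [hkeys]
  apply List.map_congr_left
  intro n _
  have hfold : functions.foldl (fun d func => d.modify (pvName func) [] (fun l => l ++ [func])) PySem.Dict.empty
      = (functions.map (fun f => (pvName f, f))).foldl (fun d p => d.modify p.1 [] (fun l => l ++ [p.2])) PySem.Dict.empty := by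
    rw [List.foldl_map]
  rw [hfold, PySem.Dict.getD_foldl_modify_append, PySem.Dict.getD_empty]
  simp [List.filter_map, Function.comp_def]
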